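-- pv_equiv track=rewrite | github.com/jzisheng/interview-questions | array/mutateTheArray/mutateTheArray.py | mutateTheArray
-- ===== SOURCE A (Python) =====
-- def mutateTheArray(n, a):
--   b = [0]*n
--   for i  in range(n):
--     n1 = 0 if i-1 < 0 else a[i-1]
--     n2 = a[i]
--     n3 = 0 if i+1 >= len(a) else a[i+1]
--     b[i] = n1+n2+n3
--   return b
--
-- n = 5
--
-- a = [4, 0, 1, -2, 3]
-- ===== SOURCE B (Python) =====
-- def mutateTheArray(n, a):
--   # Two staged passes: build a prefix-sum table, then each window sum is one subtraction.
--   prefix = [0]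
--   for x in a:
--     prefix.append(prefix[-1] + x)
--   L = len(a)
--   return [prefix[min(i + 2, L)] - prefix[max(i - 1, 0)] for i in range(n)]
-- ===== Notes on version B (the rewrite author's own statement) =====
-- stated objective: alternative
-- what changed: Replaces A's single pass with per-index boundary branches by a two-stage prefix-sum algorithm: one pass builds a cumulative-sum table, then each output element is a single subtraction prefix[min(i+2,L)]-prefix[max(i-1,0)], with no branch and no direct neighbor access.
-- outside the precondition, e.g. on mutateTheArray(2, [5]): A raises IndexError, B returns [5, 5]
import Mathlib
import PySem

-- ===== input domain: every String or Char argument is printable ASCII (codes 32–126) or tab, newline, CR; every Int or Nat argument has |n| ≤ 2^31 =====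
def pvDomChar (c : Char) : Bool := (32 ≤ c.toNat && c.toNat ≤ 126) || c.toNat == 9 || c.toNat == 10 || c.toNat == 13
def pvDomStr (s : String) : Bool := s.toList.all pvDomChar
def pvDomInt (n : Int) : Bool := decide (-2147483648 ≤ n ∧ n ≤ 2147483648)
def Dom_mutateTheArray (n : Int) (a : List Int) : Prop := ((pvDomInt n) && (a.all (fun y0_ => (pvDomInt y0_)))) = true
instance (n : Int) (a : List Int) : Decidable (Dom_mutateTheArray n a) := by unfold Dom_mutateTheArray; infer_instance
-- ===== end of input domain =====

-- B replaces A's one-pass loop with boundary branches by a two-stage prefix-sum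
-- algorithm: a cumulative-sum table, then each window sum is one subtraction
-- (objective: alternative; equivalence on return values).

-- ===== PORT A =====
def mutateTheArray (n : Int) (a : List Int) : List Int :=
  (PySem.List.pyRange 0 n 1).foldl
    (fun b i =>
      let n1 : Int := if i - 1 < 0 then 0 else PySem.List.pyGetD a (i - 1) 0
      let n2 : Int := PySem.List.pyGetD a i 0
      let n3 : Int := if i + 1 ≥ (a.length : Int) then 0 else PySem.List.pyGetD a (i + 1) 0
      PySem.List.pySetD b i (n1 + n2 + n3))
    (List.replicate n.toNat 0)

-- ===== PORT B =====
-- prefix[-1] is the last element of the (always nonempty) accumulator: getLastD 0 is exact.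
-- Both comprehension indices are always within range(len(prefix)), so pyGetD _ _ 0 is exact.
def mutateTheArray_alt (n : Int) (a : List Int) : List Int :=
  let pre : List Int := a.foldl (fun p x => p ++ [p.getLastD 0 + x]) [0]
  let L : Int := a.length
  (PySem.List.pyRange 0 n 1).map
    (fun i => PySem.List.pyGetD pre (min (i + 2) L) 0 - PySem.List.pyGetD pre (max (i - 1) 0) 0)

-- ===== PRECONDITION & SPEC =====
-- Pre_ excludes exactly the inputs with n > len(a), on which A raises IndexError (a[i]).
def Pre_mutateTheArray (n : Int) (a : List Int) : Prop := n ≤ (a.length : Int)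
instance (n : Int) (a : List Int) : Decidable (Pre_mutateTheArray n a) := by
  unfold Pre_mutateTheArray; infer_instance
def pvWitness_mutateTheArray : Int × List Int := (3, [4, 0, 1])

def Spec_mutateTheArray (n : Int) (a : List Int) (out : List Int) : Prop := out = mutateTheArray_alt n a
instance (n : Int) (a : List Int) (out : List Int) : Decidable (Spec_mutateTheArray n a out) := by unfold Spec_mutateTheArray; infer_instance

-- ===== CLAIM (what is proved, stated in full; the proofs are below) =====
def Claim_equal_mutateTheArray : Prop := ∀ (n : Int) (a : List Int), Dom_mutateTheArray n a → Pre_mutateTheArray n a → Spec_mutateTheArray n a (mutateTheArray n a)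

-- ===== LEMMAS AND PROOFS =====

-- A's per-index value, as a function of the Nat index.
def pvF (a : List Int) (k : Nat) : Int :=
  (if (k : Int) - 1 < 0 then 0 else PySem.List.pyGetD a ((k : Int) - 1) 0)
  + PySem.List.pyGetD a (k : Int) 0
  + (if (k : Int) + 1 ≥ (a.length : Int) then 0 else PySem.List.pyGetD a ((k : Int) + 1) 0)

-- A's fold fills the zero buffer left to right with pvF.
lemma fold_fill (a : List Int) (N : Nat) (m : Nat) (hm : m ≤ N) :
    (PySem.List.pyRange 0 (m : Int) 1).foldl
      (fun b i =>
        let n1 : Int := if i - 1 < 0 then 0 else PySem.List.pyGetD a (i - 1) 0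
        let n2 : Int := PySem.List.pyGetD a i 0
        let n3 : Int := if i + 1 ≥ (a.length : Int) then 0 else PySem.List.pyGetD a (i + 1) 0
        PySem.List.pySetD b i (n1 + n2 + n3))
      (List.replicate N 0)
    = (List.range m).map (pvF a) ++ List.replicate (N - m) 0 := by
  induction m with
  | zero => simp [PySem.List.pyRange_one_eq_nil]
  | succ m ih =>
    have hm' : m ≤ N := by omega
    have hsplit : ((m + 1 : Nat) : Int) = (m : Int) + 1 := by push_cast; ring
    rw [hsplit, PySem.List.pyRange_one_succ_right (by positivity), List.foldl_append, ih hm']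
    simp only [List.foldl_cons, List.foldl_nil]
    rw [PySem.List.pySetD_natCast]
    have hrep : List.replicate (N - m) (0 : Int) = 0 :: List.replicate (N - (m + 1)) 0 := by
      have : N - m = (N - (m + 1)) + 1 := by omega
      rw [this, List.replicate_succ]
    rw [List.set_append_right _ _ (by simp), hrep]
    simp [List.range_succ, pvF]

theorem mutateTheArray_eq_map (n : Int) (a : List Int) :
    mutateTheArray n a = (List.range n.toNat).map (pvF a) := by
  unfold mutateTheArray
  have hr : PySem.List.pyRange 0 n 1 = PySem.List.pyRange 0 ((n.toNat : Nat) : Int) 1 := by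
    by_cases h : 0 ≤ n
    · rw [Int.toNat_of_nonneg h]
    · rw [PySem.List.pyRange_one_eq_nil (by omega), PySem.List.pyRange_one_eq_nil (by omega)]
  rw [hr, fold_fill a n.toNat n.toNat (le_refl _)]
  simp

-- The prefix-sum table B builds is the table of partial sums.
lemma prefix_spec (a : List Int) :
    a.foldl (fun p x => p ++ [p.getLastD 0 + x]) [0]
      = (List.range (a.length + 1)).map (fun k => (a.take k).sum) := by
  induction a using List.reverseRecOn with
  | nil => simp
  | append_singleton as x ih =>
    rw [List.foldl_append, ih]
    simp only [List.foldl_cons, List.foldl_nil, List.length_append, List.length_singleton]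
    have hlast : ((List.range (as.length + 1)).map (fun k => (as.take k).sum)).getLastD 0
        = as.sum := by
      rw [List.range_succ, List.map_append]
      simp
    rw [hlast]
    rw [show as.length + 1 + 1 = (as.length + 1) + 1 from rfl, List.range_succ (n := as.length + 1),
      List.map_append]
    congr 1
    · apply List.map_congr_left
      intro k hk
      simp only [List.mem_range] at hk
      rw [List.take_append_of_le_length (by omega)]
    · simp only [List.map_singleton, List.cons.injEq, and_true]
      rw [List.take_append, List.take_of_length_le (by omega : as.length ≤ as.length + 1)]
      simp

-- A's three-branch value, in getElem form.
lemma pvF_getElem (a : List Int) (k : Nat) (hk : k < a.length) :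
    pvF a k = (if _hz : k = 0 then 0 else a[k - 1]'(by omega)) + a[k]'hk
      + (if hc : k + 1 < a.length then a[k + 1]'hc else 0) := by
  have gd : ∀ (m : Nat) (hm : m < a.length), PySem.List.pyGetD a (m : Int) 0 = a[m]'hm := by
    intro m hm
    rw [PySem.List.pyGetD_natCast]
    exact List.getD_eq_getElem a 0 hm
  unfold pvF
  congr 1
  · congr 1
    · by_cases hz : k = 0
      · rw [if_pos (by omega), dif_pos hz]
      · rw [if_neg (by omega), dif_neg hz]
        have hcast : (k : Int) - 1 = ((k - 1 : Nat) : Int) := by omega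
        rw [hcast, gd (k - 1) (by omega)]
    · exact gd k hk
  · by_cases hc : k + 1 < a.length
    · rw [if_neg (by omega), dif_pos hc]
      have hcast : (k : Int) + 1 = ((k + 1 : Nat) : Int) := by push_cast; ring
      rw [hcast, gd (k + 1) hc]
    · rw [if_pos (by omega), dif_neg hc]

-- The prefix-sum difference computes the same three-element window sum.
lemma window_sum (a : List Int) (k : Nat) (hk : k < a.length) :
    (a.take (min (k + 2) a.length)).sum - (a.take (k - 1)).sum
      = (if _hz : k = 0 then 0 else a[k - 1]'(by omega)) + a[k]'hk
        + (if hc : k + 1 < a.length then a[k + 1]'hc else 0) := by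
  by_cases hc : k + 1 < a.length
  · rw [min_eq_left (by omega), dif_pos hc]
    rw [show k + 2 = (k + 1) + 1 from rfl, List.sum_take_succ a (k + 1) hc,
      List.sum_take_succ a k hk]
    by_cases hz : k = 0
    · subst hz
      simp
    · rw [dif_neg hz]
      have s1 := List.sum_take_succ a (k - 1) (by omega)
      have hk1 : k - 1 + 1 = k := by omega
      rw [hk1] at s1
      rw [s1]
      ring
  · have h1 : min (k + 2) a.length = k + 1 := by omega
    rw [h1, dif_neg hc, List.sum_take_succ a k hk]
    by_cases hz : k = 0
    · subst hz
      simp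
    · rw [dif_neg hz]
      have s1 := List.sum_take_succ a (k - 1) (by omega)
      have hk1 : k - 1 + 1 = k := by omega
      rw [hk1] at s1
      rw [s1]
      ring

-- B's per-index value equals A's, for k < len(a).
lemma pointwise (a : List Int) (k : Nat) (hk : k < a.length) :
    PySem.List.pyGetD (a.foldl (fun p x => p ++ [p.getLastD 0 + x]) [0])
        (min ((k : Int) + 2) (a.length : Int)) 0
      - PySem.List.pyGetD (a.foldl (fun p x => p ++ [p.getLastD 0 + x]) [0])
        (max ((k : Int) - 1) 0) 0
      = pvF a k := by
  rw [prefix_spec]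
  have gd : ∀ (m : Nat), m ≤ a.length →
      PySem.List.pyGetD ((List.range (a.length + 1)).map (fun j => (a.take j).sum)) (m : Int) 0
        = (a.take m).sum := by
    intro m hm
    rw [PySem.List.pyGetD_natCast]
    exact PySem.List.getD_map_range _ (a.length + 1) m 0 (by omega)
  have hhi : min ((k : Int) + 2) (a.length : Int) = ((min (k + 2) a.length : Nat) : Int) := by
    push_cast; omega
  have hlo : max ((k : Int) - 1) 0 = (((k - 1 : Nat)) : Int) := by omega
  rw [hhi, hlo, gd _ (by omega), gd _ (by omega), window_sum a k hk, pvF_getElem a k hk]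

-- ===== VERDICT (by name: the statement is the Claim_ definition above) =====
theorem mutateTheArray_spec : Claim_equal_mutateTheArray := by
  intro n a _ hpre
  unfold Spec_mutateTheArray mutateTheArray_alt
  rw [mutateTheArray_eq_map]
  rw [PySem.List.pyRange_one]
  simp only [sub_zero, List.map_map]
  apply List.map_congr_left
  intro k hk
  simp only [List.mem_range] at hk
  have hka : k < a.length := by
    have := hpre
    unfold Pre_mutateTheArray at this
    omega
  simp only [Function.comp_apply, zero_add]
  exact (pointwise a k hka).symm
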